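-- pv_equiv track=rewrite | github.com/Walfred-MA/PAAT | scripts/reorderbytree.py | kmerencode
-- ===== SOURCE A (Python) =====
-- def kmerencode(kmer):
--
-- 	kmerint = 0
-- 	for base in kmer:
--
-- 		kmerint *= 4
-- 		if base=='a' or base =='A':
--
-- 			kmerint += 0
--
-- 		elif base=='c' or base =='C':
--
-- 			kmerint += 1
--
-- 		elif base=='g' or base =='G':
--
-- 			kmerint += 2
-- 		elif base=='t' or base =='T':
--
-- 			kmerint += 3
--
-- 	return kmerint
-- ===== SOURCE B (Python) =====
-- def kmerencode(kmer):
--     M = {'a': 0, 'A': 0, 'c': 1, 'C': 1, 'g': 2, 'G': 2, 't': 3, 'T': 3}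
--     total = 0
--     weight = 1
--     for base in reversed(kmer):
--         total += M.get(base, 0) * weight
--         weight *= 4
--     return total
-- ===== Notes on version B (the rewrite author's own statement) =====
-- stated objective: alternative
-- what changed: Replaces A's left-to-right Horner accumulation with an if/elif chain by a right-to-left pass over reversed(kmer) that adds dict-looked-up digit times a running place-value weight (two accumulators instead of one, dict instead of branches).
import Mathlib
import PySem

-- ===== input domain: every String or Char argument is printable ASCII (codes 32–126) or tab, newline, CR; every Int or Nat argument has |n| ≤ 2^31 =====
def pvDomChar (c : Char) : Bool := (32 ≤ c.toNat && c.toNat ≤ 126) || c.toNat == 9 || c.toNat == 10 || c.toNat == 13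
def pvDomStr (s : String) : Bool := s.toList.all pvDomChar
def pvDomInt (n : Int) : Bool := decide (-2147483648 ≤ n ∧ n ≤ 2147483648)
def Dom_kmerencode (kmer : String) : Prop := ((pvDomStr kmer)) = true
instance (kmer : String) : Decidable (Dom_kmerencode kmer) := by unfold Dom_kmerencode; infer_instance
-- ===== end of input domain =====

-- B replaces A's left-to-right Horner accumulation with an if/elif chain by a
-- right-to-left pass with a base->digit dict and a running place-value weight.

-- ===== PORT A =====
def kmerencode (kmer : String) : Int :=
  kmer.toList.foldl (fun kmerint base =>
    let k := kmerint * 4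
    if base = 'a' ∨ base = 'A' then k + 0
    else if base = 'c' ∨ base = 'C' then k + 1
    else if base = 'g' ∨ base = 'G' then k + 2
    else if base = 't' ∨ base = 'T' then k + 3
    else k) 0

-- ===== PORT B =====
def kmerMap : PySem.Dict Char Int :=
  PySem.Dict.ofList [('a',0),('A',0),('c',1),('C',1),('g',2),('G',2),('t',3),('T',3)]

-- state is the pair (total, weight); 'for base in reversed(kmer)' is a fold over the reversed list
def kmerencode_alt (kmer : String) : Int :=
  (kmer.toList.reverse.foldl (fun (s : Int × Int) base =>
    (s.1 + kmerMap.getD base 0 * s.2, s.2 * 4)) (0, 1)).1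

-- ===== PRECONDITION & SPEC =====
def Spec_kmerencode (kmer : String) (out : Int) : Prop := out = kmerencode_alt kmer
instance (kmer : String) (out : Int) : Decidable (Spec_kmerencode kmer out) := by unfold Spec_kmerencode; infer_instance

-- ===== CLAIM (what is proved, stated in full; the proofs are below) =====
def Claim_equal_kmerencode : Prop := ∀ (kmer : String), Dom_kmerencode kmer → Spec_kmerencode kmer (kmerencode kmer)

-- ===== LEMMAS AND PROOFS =====

-- B's digit value of one character
def kmerVal (c : Char) : Int := kmerMap.getD c 0

-- B's fold, on a raw (already reversed) character list
def kmerB (r : List Char) (s : Int × Int) : Int × Int :=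
  r.foldl (fun (s : Int × Int) base => (s.1 + kmerMap.getD base 0 * s.2, s.2 * 4)) s

-- A's loop body is 'multiply by 4, add B's dict value (0 for unknown characters)'
lemma kmer_step_eq (acc : Int) (c : Char) :
    (let k := acc * 4
     if c = 'a' ∨ c = 'A' then k + 0
     else if c = 'c' ∨ c = 'C' then k + 1
     else if c = 'g' ∨ c = 'G' then k + 2
     else if c = 't' ∨ c = 'T' then k + 3
     else k) = acc * 4 + kmerVal c := by
  show _ = _
  simp only [kmerVal, kmerMap, PySem.Dict.ofList, PySem.Dict.update, List.foldl,
    PySem.Dict.getD_insert, PySem.Dict.getD_empty]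
  split_ifs <;> simp_all

-- loop invariant: B's fold from (t, w) totals t plus w times its result from (0, 1)
lemma kmerB_invariant (r : List Char) (t w : Int) :
    (kmerB r (t, w)).1 = t + w * (kmerB r (0, 1)).1 := by
  induction r generalizing t w with
  | nil => simp [kmerB]
  | cons c r ih =>
      simp only [kmerB, List.foldl_cons] at *
      rw [ih, ih (0 + kmerMap.getD c 0 * 1)]
      ring

-- hence peeling the first (least-significant-last) character:
lemma kmerB_cons (c : Char) (r : List Char) :
    (kmerB (c :: r) (0, 1)).1 = kmerVal c + 4 * (kmerB r (0, 1)).1 := by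
  show (kmerB r (0 + kmerMap.getD c 0 * 1, 1 * 4)).1 = _
  rw [kmerB_invariant]
  simp [kmerVal]

-- A's Horner fold on l equals B's fold on l.reverse
lemma kmer_fold_eq (l : List Char) :
    l.foldl (fun kmerint base =>
      let k := kmerint * 4
      if base = 'a' ∨ base = 'A' then k + 0
      else if base = 'c' ∨ base = 'C' then k + 1
      else if base = 'g' ∨ base = 'G' then k + 2
      else if base = 't' ∨ base = 'T' then k + 3
      else k) 0 = (kmerB l.reverse (0, 1)).1 := by
  induction l using List.reverseRecOn with
  | nil => simp [kmerB]
  | append_singleton l c ih =>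
      rw [List.foldl_append, List.foldl_cons, List.foldl_nil, kmer_step_eq, ih,
        List.reverse_append, List.reverse_singleton, List.singleton_append, kmerB_cons]
      ring

-- ===== VERDICT (by name: the statement is the Claim_ definition above) =====
theorem kmerencode_spec : Claim_equal_kmerencode := by
  intro kmer _
  show kmerencode kmer = kmerencode_alt kmer
  unfold kmerencode kmerencode_alt
  exact kmer_fold_eq kmer.toList
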